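-- pv_equiv track=rewrite | github.com/kde0820/ProgrammersAlgorithm | Level_4/공항 건설하기/main.py | chooseCity
-- ===== SOURCE A (Python) =====
-- def chooseCity(n,city):
--     answer = 0
--     city.sort()
--     left, right = 0, sum([x[1] for x in city])
--
--     for i in range(n):
--         left += city[i][1]
--         right -= city[i][1]
--         if right > left:
--             answer = city[i+1][0]
--     return answer
-- ===== SOURCE B (Python) =====
-- def chooseCity(n, city):
--     city.sort()
--     total = sum(x[1] for x in city)
--
--     def search(lo, hi, base):
--         # last index i in [lo, hi) with (suffix weight) > (prefix weight through i),
--         # where base = sum of weights of city[0:lo]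
--         if hi - lo <= 0:
--             return None
--         if hi - lo == 1:
--             left = base + city[lo][1]
--             if total - left > left:
--                 return lo
--             return None
--         mid = (lo + hi) // 2
--         leftsum = sum(city[i][1] for i in range(lo, mid))
--         r = search(mid, hi, base + leftsum)
--         if r is not None:
--             return r
--         return search(lo, mid, base)
--
--     i = search(0, n, 0)
--     return 0 if i is None else city[i + 1][0]
-- ===== Notes on version B (the rewrite author's own statement) =====
-- stated objective: alternative
-- what changed: Replaces A's single forward scan with incremental left/right accumulators by a recursive divide-and-conquer over index segments: each segment is split at its midpoint, the right half is searched first (carrying the segment's base prefix weight), and the left half only if the right half has no qualifying index, which yields the same maximal qualifying index.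
import Mathlib
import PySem

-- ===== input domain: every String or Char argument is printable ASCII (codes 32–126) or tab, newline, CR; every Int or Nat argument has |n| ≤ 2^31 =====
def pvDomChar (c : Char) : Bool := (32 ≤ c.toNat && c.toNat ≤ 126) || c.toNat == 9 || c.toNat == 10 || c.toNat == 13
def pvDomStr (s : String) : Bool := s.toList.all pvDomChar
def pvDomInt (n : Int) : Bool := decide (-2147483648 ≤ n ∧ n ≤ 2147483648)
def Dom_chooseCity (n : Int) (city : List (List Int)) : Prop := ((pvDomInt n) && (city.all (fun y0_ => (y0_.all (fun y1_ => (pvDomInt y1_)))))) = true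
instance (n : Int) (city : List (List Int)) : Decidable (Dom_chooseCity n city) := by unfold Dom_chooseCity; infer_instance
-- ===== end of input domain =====

-- B replaces A's single forward accumulator scan by a recursive divide-and-conquer over
-- index segments (right half searched first, left half only if the right half is empty of
-- qualifying indices), same result.  Both A and B sort `city` in place; the equivalence
-- proved is about the return value (the mutation is identical: both leave `city` sorted).

-- ===== PORT A =====
def chooseCity (n : Int) (city : List (List Int)) : Int :=
  let s := PySem.List.sorted city (fun x => x) false
  let total := (s.map (fun x => PySem.List.pyGetD x 1 0)).sum
  ((PySem.List.pyRange 0 n 1).foldl (fun (st : Int × Int × Int) i =>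
      let w := PySem.List.pyGetD (PySem.List.pyGetD s i []) 1 0
      let left := st.2.1 + w
      let right := st.2.2 - w
      (if right > left then PySem.List.pyGetD (PySem.List.pyGetD s (i + 1) []) 0 0 else st.1,
       left, right))
    (0, 0, total)).1

-- ===== PORT B =====
-- search(lo, hi, base) of Source B: last qualifying index in [lo, hi), base = weight of city[0:lo]
def chooseCitySearch (city : List (List Int)) (total lo hi base : Int) : Option Int :=
  if hi - lo ≤ 0 then none
  else if hi - lo = 1 then
    let left := base + PySem.List.pyGetD (PySem.List.pyGetD city lo []) 1 0
    if total - left > left then some lo else none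
  else
    let mid := PySem.Int.floordiv (lo + hi) 2
    let leftsum := ((PySem.List.pyRange lo mid 1).map
      (fun i => PySem.List.pyGetD (PySem.List.pyGetD city i []) 1 0)).sum
    match chooseCitySearch city total mid hi (base + leftsum) with
    | some r => some r
    | none => chooseCitySearch city total lo mid base
termination_by (hi - lo).toNat
decreasing_by
  · rw [PySem.Int.floordiv_eq_ediv_of_pos (by norm_num : (0:Int) < 2)]; omega
  · rw [PySem.Int.floordiv_eq_ediv_of_pos (by norm_num : (0:Int) < 2)]; omega

def chooseCity_alt (n : Int) (city : List (List Int)) : Int :=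
  let s := PySem.List.sorted city (fun x => x) false
  let total := (s.map (fun x => PySem.List.pyGetD x 1 0)).sum
  match chooseCitySearch s total 0 n 0 with
  | some i => PySem.List.pyGetD (PySem.List.pyGetD s (i + 1) []) 0 0
  | none => 0

-- ===== PRECONDITION & SPEC =====
-- Pre_ is exactly the inputs on which the Python A returns: every row needs a second entry
-- (the weight sum reads x[1] of every row), n may not exceed the row count, and when
-- n = len(city) with a negative total weight A's last iteration reads city[len] and raises.
def Pre_chooseCity (n : Int) (city : List (List Int)) : Prop :=
  (∀ x ∈ city, 2 ≤ x.length) ∧ n ≤ (city.length : Int) ∧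
  ¬(n = (city.length : Int) ∧ (city.map (fun x => PySem.List.pyGetD x 1 0)).sum < 0)
instance (n : Int) (city : List (List Int)) : Decidable (Pre_chooseCity n city) := by
  unfold Pre_chooseCity; infer_instance
def pvWitness_chooseCity : Int × List (List Int) := (1, [[3, 1], [1, 2]])

def Spec_chooseCity (n : Int) (city : List (List Int)) (out : Int) : Prop := out = chooseCity_alt n city
instance (n : Int) (city : List (List Int)) (out : Int) : Decidable (Spec_chooseCity n city out) := by unfold Spec_chooseCity; infer_instance

-- ===== CLAIM (what is proved, stated in full; the proofs are below) =====
def Claim_equal_chooseCity : Prop := ∀ (n : Int) (city : List (List Int)), Dom_chooseCity n city → Pre_chooseCity n city → Spec_chooseCity n city (chooseCity n city)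

-- ===== LEMMAS AND PROOFS =====

-- weight of a row, prefix sums, total, the qualifying condition, the returned city id
def pvW (x : List Int) : Int := PySem.List.pyGetD x 1 0
def pvP (s : List (List Int)) (k : Nat) : Int := ((s.take k).map pvW).sum
def pvTot (s : List (List Int)) : Int := (s.map pvW).sum
def pvCond (s : List (List Int)) (i : Int) : Bool :=
  decide (pvTot s - pvP s (i + 1).toNat > pvP s (i + 1).toNat)
def pvG (s : List (List Int)) (i : Int) : Int :=
  PySem.List.pyGetD (PySem.List.pyGetD s (i + 1) []) 0 0
def pvAns (s : List (List Int)) (l : List Int) : Int :=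
  match l.reverse.find? (pvCond s) with
  | some i => pvG s i
  | none => 0

theorem pvCond_char (s : List (List Int)) (k : Nat) :
    pvCond s (k : Int) = decide (pvTot s - pvP s (k + 1) > pvP s (k + 1)) := by
  have h : (((k : Int)) + 1).toNat = k + 1 := by omega
  simp [pvCond, h]

theorem pvP_succ (s : List (List Int)) (k : Nat) (hk : k < s.length) :
    pvP s (k + 1) = pvP s k + pvW s[k] := by
  have : pvP s (k + 1) = ((s.map pvW).take (k + 1)).sum := by
    simp [pvP, List.map_take]
  rw [this, List.sum_take_succ (s.map pvW) k (by simpa using hk)]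
  simp [pvP, List.map_take]

theorem pvAns_snoc (s : List (List Int)) (l : List Int) (i : Int) :
    pvAns s (l ++ [i]) = if pvCond s i then pvG s i else pvAns s l := by
  unfold pvAns
  rw [List.reverse_append]
  simp only [List.reverse_cons, List.reverse_nil, List.nil_append, List.singleton_append,
    List.find?_cons]
  cases h : pvCond s i <;> simp

theorem pvLoopA (s : List (List Int)) (N : Nat) (hN : N ≤ s.length) :
    ((List.range N).map (Nat.cast : Nat → Int)).foldl (fun (st : Int × Int × Int) i =>
        let w := PySem.List.pyGetD (PySem.List.pyGetD s i []) 1 0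
        let left := st.2.1 + w
        let right := st.2.2 - w
        (if right > left then PySem.List.pyGetD (PySem.List.pyGetD s (i + 1) []) 0 0 else st.1,
         left, right))
      (0, 0, pvTot s)
    = (pvAns s ((List.range N).map (Nat.cast : Nat → Int)), pvP s N, pvTot s - pvP s N) := by
  induction N with
  | zero => simp [pvAns, pvP]
  | succ N ih =>
    have hN' : N ≤ s.length := by omega
    have hNlt : N < s.length := by omega
    rw [List.range_succ]
    simp only [List.map_append, List.foldl_append]
    rw [ih hN']
    simp only [List.map_cons, List.map_nil, List.foldl_cons, List.foldl_nil]
    have hw : PySem.List.pyGetD s (N : Int) [] = s[N] := by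
      rw [PySem.List.pyGetD_natCast]
      simp [List.getD_eq_getElem?_getD, hNlt]
    rw [hw]
    have hleft : pvP s N + PySem.List.pyGetD s[N] 1 0 = pvP s (N + 1) := by
      rw [pvP_succ s N hNlt]; rfl
    have hcond : pvCond s (N : Int)
        = decide (pvTot s - pvP s (N + 1) > pvP s (N + 1)) := pvCond_char s N
    rw [pvAns_snoc]
    simp only [hcond]
    have hr : pvTot s - pvP s N - PySem.List.pyGetD s[N] 1 0 = pvTot s - pvP s (N + 1) := by
      have := hleft; omega
    by_cases hc : pvTot s - pvP s (N + 1) > pvP s (N + 1)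
    · simp only [hleft, hr, decide_eq_true_eq, hc, if_true, pvG]
    · simp only [hleft, hr, decide_eq_true_eq, hc, if_false]

-- segment weight sum read through pyRange/pyGetD equals the prefix-sum difference
theorem pvSegSum (s : List (List Int)) (a k : Nat) (h : a + k ≤ s.length) :
    pvP s a + ((PySem.List.pyRange (a : Int) ((a + k : Nat) : Int) 1).map
      (fun i => PySem.List.pyGetD (PySem.List.pyGetD s i []) 1 0)).sum = pvP s (a + k) := by
  induction k with
  | zero => simp [PySem.List.pyRange_one_eq_nil]
  | succ k ih =>
    have hk : a + k < s.length := by omega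
    have hcast : ((a + (k + 1) : Nat) : Int) = ((a + k : Nat) : Int) + 1 := by push_cast; ring
    rw [hcast, PySem.List.pyRange_one_succ_right (by exact_mod_cast Nat.le_add_right a k)]
    have hw : PySem.List.pyGetD s ((a + k : Nat) : Int) [] = s[a + k] := by
      rw [PySem.List.pyGetD_natCast]
      simp [List.getD_eq_getElem?_getD, hk]
    rw [List.map_append, List.sum_append]
    simp only [List.map_cons, List.map_nil, List.sum_cons, List.sum_nil, hw]
    have := ih (by omega)
    have hsucc := pvP_succ s (a + k) hk
    rw [show a + (k + 1) = (a + k) + 1 by ring, hsucc]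
    unfold pvW at *
    omega

-- the divide-and-conquer search finds the last qualifying index of the segment
theorem pvSearch_eq (s : List (List Int)) : ∀ (d lo hi : Nat), hi - lo ≤ d → hi ≤ s.length →
    chooseCitySearch s (pvTot s) (lo : Int) (hi : Int) (pvP s lo)
      = (PySem.List.pyRange (lo : Int) (hi : Int) 1).reverse.find? (pvCond s) := by
  intro d
  induction d with
  | zero =>
    intro lo hi hd _
    have hle : hi ≤ lo := by omega
    rw [chooseCitySearch]
    rw [if_pos (by omega)]
    rw [PySem.List.pyRange_one_eq_nil (by exact_mod_cast hle)]
    simp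
  | succ d ih =>
    intro lo hi hd hhi
    rw [chooseCitySearch]
    by_cases h0 : hi ≤ lo
    · rw [if_pos (by omega)]
      rw [PySem.List.pyRange_one_eq_nil (by exact_mod_cast (by omega : hi ≤ lo))]
      simp
    · have h0' : lo < hi := by omega
      rw [if_neg (by push_cast; omega)]
      by_cases h1 : hi = lo + 1
      · subst h1
        rw [if_pos (by push_cast; ring)]
        have hlt : lo < s.length := by omega
        have hw : PySem.List.pyGetD s (lo : Int) [] = s[lo] := by
          rw [PySem.List.pyGetD_natCast]
          simp [List.getD_eq_getElem?_getD, hlt]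
        have hleft : pvP s lo + PySem.List.pyGetD s[lo] 1 0 = pvP s (lo + 1) := by
          rw [pvP_succ s lo hlt]; rfl
        have hrange : PySem.List.pyRange (lo : Int) ((lo + 1 : Nat) : Int) 1 = [(lo : Int)] := by
          rw [show ((lo + 1 : Nat) : Int) = (lo : Int) + 1 by push_cast; ring]
          exact PySem.List.pyRange_one_singleton lo
        rw [hrange]
        simp only [List.reverse_cons, List.reverse_nil, List.nil_append, List.find?_cons]
        rw [hw, pvCond_char s lo]
        simp only [hleft]
        by_cases hc : pvTot s - pvP s (lo + 1) > pvP s (lo + 1)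
        · simp [hc]
        · simp [hc]
      · rw [if_neg (by push_cast; omega)]
        set m : Nat := (lo + hi) / 2 with hm
        have hmid : PySem.Int.floordiv ((lo : Int) + (hi : Int)) 2 = (m : Int) := by
          rw [show ((lo : Int) + (hi : Int)) = ((lo + hi : Nat) : Int) by push_cast; ring]
          exact_mod_cast PySem.Int.floordiv_natCast (lo + hi) 2
        have hlm : lo < m := by omega
        have hmh : m < hi := by omega
        rw [hmid]
        simp only [letFun]
        have hseg := pvSegSum s lo (m - lo) (by omega)
        rw [show lo + (m - lo) = m by omega] at hseg
        rw [hseg]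
        rw [ih m hi (by omega) hhi, ih lo m (by omega) (by omega)]
        rw [PySem.List.pyRange_one_append (lo : Int) (m : Int) (hi : Int)
          (by push_cast; omega) (by push_cast; omega)]
        rw [List.reverse_append, List.find?_append]
        cases hF : (PySem.List.pyRange (m : Int) (hi : Int) 1).reverse.find?
            (pvCond s) with
        | some r => simp
        | none => simp

-- ===== VERDICT (by name: the statement is the Claim_ definition above) =====
theorem chooseCity_spec : Claim_equal_chooseCity := by
  intro n city _hdom hpre
  obtain ⟨-, hn, -⟩ := hpre
  unfold Spec_chooseCity chooseCity chooseCity_alt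
  simp only [letFun]
  set s := PySem.List.sorted city (fun x => x) false with hs
  have hslen : s.length = city.length := PySem.List.length_sorted city _ _
  have htot : (s.map (fun x => PySem.List.pyGetD x 1 0)).sum = pvTot s := rfl
  by_cases hn0 : n ≤ 0
  · rw [PySem.List.pyRange_one_eq_nil hn0]
    rw [chooseCitySearch, if_pos (by omega)]
    simp
  · rw [not_le] at hn0
    obtain ⟨N, hNn⟩ : ∃ N : Nat, n = (N : Int) := ⟨n.toNat, by omega⟩
    have hNs : N ≤ s.length := by rw [hslen]; omega
    have hr1 : PySem.List.pyRange 0 n 1 = (List.range N).map (Nat.cast : Nat → Int) := by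
      rw [hNn]; simpa using PySem.List.pyRange_zero_natCast N
    rw [hr1, htot]
    have hA := pvLoopA s N hNs
    rw [hA]
    have hB := pvSearch_eq s N 0 N (by omega) hNs
    have hP0 : pvP s 0 = 0 := by simp [pvP]
    rw [hP0] at hB
    simp only [Nat.cast_zero] at hB
    rw [hNn] at hr1
    rw [hr1] at hB
    rw [hNn, hB]
    unfold pvAns
    cases hF : (((List.range N).map (Nat.cast : Nat → Int)).reverse.find? (pvCond s)) with
    | none => simp
    | some i => simp [pvG]
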